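-- pv_equiv track=rewrite | github.com/amyxhehe/Beginner_Projects | SentimentClassifier.py | negative_score
-- ===== SOURCE A (Python) =====
-- def negative_score(st):
--     ns = 0
--     words = st.split(" ")
--     negative_words = ["terrible", "horrible", "awful", "bad", "poor",
--     "disappointing", "unpleasant", "dreadful", "mediocre", "inferior",
--     "subpar", "unacceptable", "unsatisfactory", "lousy", "miserable",
--     "atrocious", "abysmal", "deplorable", "pathetic", "pitiful",
--     "horrendous", "appalling", "shoddy", "woeful", "unfavorable",
--     "unimpressive", "disgusting", "repulsive", "unpleasant", "offensive",
--     "unappealing", "disastrous", "disheartening", "repugnant", "noxious",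
--     "vile", "gross", "shameful", "despicable", "unfortunate", "tragic",
--     "disastrous", "unfortunate", "depressing", "distressing", "gloomy",
--     "dreary", "miserable", "unhappy", "sorrowful"]
--     for word in words:
--         word = word.lower()
--         if word in negative_words:
--             ns += 1
--     return ns
-- ===== SOURCE B (Python) =====
-- NEG_VOCAB = ("terrible horrible awful bad poor disappointing unpleasant dreadful "
--              "mediocre inferior subpar unacceptable unsatisfactory lousy miserable "
--              "atrocious abysmal deplorable pathetic pitiful horrendous appalling "
--              "shoddy woeful unfavorable unimpressive disgusting repulsive offensive "
--              "unappealing disastrous disheartening repugnant noxious vile gross "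
--              "shameful despicable unfortunate tragic depressing distressing gloomy "
--              "dreary unhappy sorrowful")
--
-- def negative_score(st):
--     negatives = set(NEG_VOCAB.split(" "))
--     counts = {}
--     for w in st.split(" "):
--         w = w.lower()
--         counts[w] = counts.get(w, 0) + 1
--     return sum(counts.get(w, 0) for w in negatives)
-- ===== Notes on version B (the rewrite author's own statement) =====
-- stated objective: alternative
-- what changed: B keeps the vocabulary as one space-joined string split into a set, builds a frequency table of the lowercased input words in one pass, and sums the table's counts over that deduplicated vocabulary, instead of A's per-input-word membership scan of the 50-entry list.
import Mathlib
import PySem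

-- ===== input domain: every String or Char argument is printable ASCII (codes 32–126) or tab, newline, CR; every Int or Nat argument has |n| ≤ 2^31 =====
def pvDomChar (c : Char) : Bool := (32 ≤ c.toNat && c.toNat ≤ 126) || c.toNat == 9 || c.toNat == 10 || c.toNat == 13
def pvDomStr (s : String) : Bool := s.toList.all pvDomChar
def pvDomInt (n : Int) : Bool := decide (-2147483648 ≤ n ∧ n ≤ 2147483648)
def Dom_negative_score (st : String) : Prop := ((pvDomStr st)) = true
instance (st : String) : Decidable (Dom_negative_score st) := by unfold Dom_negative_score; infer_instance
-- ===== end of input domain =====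

-- B inverts A's traversal (frequency table of the lowered words, then a sum of lookups over the
-- deduplicated vocabulary, kept as one space-joined string): alternative shape, same cost class.

-- ===== PORT A =====
-- A's module-level duplicate-carrying vocabulary list, verbatim
def negWords : List String := ["terrible", "horrible", "awful", "bad", "poor",
  "disappointing", "unpleasant", "dreadful", "mediocre", "inferior",
  "subpar", "unacceptable", "unsatisfactory", "lousy", "miserable",
  "atrocious", "abysmal", "deplorable", "pathetic", "pitiful",
  "horrendous", "appalling", "shoddy", "woeful", "unfavorable",
  "unimpressive", "disgusting", "repulsive", "unpleasant", "offensive",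
  "unappealing", "disastrous", "disheartening", "repugnant", "noxious",
  "vile", "gross", "shameful", "despicable", "unfortunate", "tragic",
  "disastrous", "unfortunate", "depressing", "distressing", "gloomy",
  "dreary", "miserable", "unhappy", "sorrowful"]

-- st.split(" ") with a nonempty separator never yields None; getD [] is unreachable padding.
def negative_score (st : String) : Int :=
  ((PySem.Str.split? st " ").getD []).foldl
    (fun ns word => if negWords.contains (PySem.Str.lower word) then ns + 1 else ns) 0

-- ===== PORT B =====
-- Source B's NEG_VOCAB constant: the vocabulary as one space-joined string
def negVocabStr : String :=
  "terrible horrible awful bad poor disappointing unpleasant dreadful mediocre inferior subpar unacceptable unsatisfactory lousy miserable atrocious abysmal deplorable pathetic pitiful horrendous appalling shoddy woeful unfavorable unimpressive disgusting repulsive offensive unappealing disastrous disheartening repugnant noxious vile gross shameful despicable unfortunate tragic depressing distressing gloomy dreary unhappy sorrowful"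

def negative_score_alt (st : String) : Int :=
  let negatives : PySem.Set String :=
    PySem.Set.ofList ((PySem.Str.split? negVocabStr " ").getD [])
  let counts : PySem.Dict String Int :=
    ((PySem.Str.split? st " ").getD []).foldl
      (fun d w => d.insert (PySem.Str.lower w) (d.getD (PySem.Str.lower w) 0 + 1))
      PySem.Dict.empty
  (negatives.map (fun w => counts.getD w 0)).sum

-- ===== PRECONDITION & SPEC =====
def Spec_negative_score (st : String) (out : Int) : Prop := out = negative_score_alt st
instance (st : String) (out : Int) : Decidable (Spec_negative_score st out) := by unfold Spec_negative_score; infer_instance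

-- ===== CLAIM (what is proved, stated in full; the proofs are below) =====
def Claim_equal_negative_score : Prop := ∀ (st : String), Dom_negative_score st → Spec_negative_score st (negative_score st)

-- ===== LEMMAS AND PROOFS =====

-- splitting B's vocabulary string yields this literal list
def negVocabList : List String :=
  ["terrible", "horrible", "awful", "bad", "poor", "disappointing", "unpleasant", "dreadful",
   "mediocre", "inferior", "subpar", "unacceptable", "unsatisfactory", "lousy", "miserable",
   "atrocious", "abysmal", "deplorable", "pathetic", "pitiful", "horrendous", "appalling",
   "shoddy", "woeful", "unfavorable", "unimpressive", "disgusting", "repulsive", "offensive",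
   "unappealing", "disastrous", "disheartening", "repugnant", "noxious", "vile", "gross",
   "shameful", "despicable", "unfortunate", "tragic", "depressing", "distressing", "gloomy",
   "dreary", "unhappy", "sorrowful"]

set_option maxRecDepth 65536 in
lemma split_vocab : (PySem.Str.split? negVocabStr " ").getD [] = negVocabList := by decide

set_option maxRecDepth 65536 in
lemma mem_vocab_iff (y : String) : y ∈ negVocabList ↔ y ∈ negWords := by
  constructor <;> intro h <;> fin_cases h <;> decide

lemma contains_vocab (y : String) : negVocabList.contains y = negWords.contains y := by
  by_cases h : y ∈ negWords
  · simp [h, (mem_vocab_iff y).mpr h]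
  · have h2 : y ∉ negVocabList := fun hh => h ((mem_vocab_iff y).mp hh)
    simp [h, h2]

-- over a Nodup list, the 0/1 indicator sum of (· == x) is the membership indicator
lemma sum_indicator (x : String) (S : List String) (h : S.Nodup) :
    (S.map (fun w => if w == x then (1:Int) else 0)).sum = if S.contains x then 1 else 0 := by
  induction S with
  | nil => simp
  | cons s S ih =>
    simp only [List.nodup_cons] at h
    by_cases hx : s = x
    · subst hx
      have hz : (S.map (fun w => if w == s then (1:Int) else 0)).sum = 0 := by
        apply List.sum_eq_zero
        intro y hy
        simp only [List.mem_map] at hy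
        obtain ⟨w, hw, rfl⟩ := hy
        have hns : (w == s) = false := by
          refine beq_eq_false_iff_ne.mpr ?_
          exact fun hws => h.1 (hws ▸ hw)
        simp [hns]
      rw [List.map_cons, List.sum_cons, hz, add_zero]
      simp
    · have hsx : (s == x) = false := beq_eq_false_iff_ne.mpr hx
      have hxs : (x == s) = false := beq_eq_false_iff_ne.mpr (fun hh => hx hh.symm)
      rw [List.map_cons, List.sum_cons, hsx]
      simp only [Bool.false_eq_true, if_false, zero_add, ih h.2, List.contains_cons, hxs,
        Bool.false_or]

-- summing per-vocabulary-word counts over a Nodup vocabulary = counting input words in the vocabulary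
lemma sum_counts (S : List String) (h : S.Nodup) (ws : List String) :
    (S.map (fun w => (ws.count w : Int))).sum = (ws.countP (fun w => S.contains w) : Int) := by
  induction ws with
  | nil => simp
  | cons x ws ih =>
    have hmap : S.map (fun w => (((x :: ws).count w : Nat) : Int))
        = S.map (fun w => (ws.count w : Int) + if w == x then (1:Int) else 0) := by
      apply List.map_congr_left
      intro w _
      rw [List.count_cons]
      by_cases hb : w = x
      · subst hb; simp
      · have hb' : (w == x) = false := beq_eq_false_iff_ne.mpr hb
        have hb'' : ¬ x = w := fun hh => hb hh.symm
        simp [hb', hb'']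
    rw [hmap, PySem.List.sum_map_add_int, ih, sum_indicator x S h, List.countP_cons]
    by_cases hx : S.contains x = true <;> simp

lemma contains_ofList_str (xs : List String) (y : String) :
    (PySem.Set.ofList xs).contains y = xs.contains y := by
  by_cases hy : y ∈ xs
  · simp [hy, (PySem.Set.mem_ofList xs y).mpr hy]
  · have h2 : y ∉ PySem.Set.ofList xs := fun h => hy ((PySem.Set.mem_ofList xs y).mp h)
    simp [hy, h2]

lemma getD_empty_int (v : String) : (PySem.Dict.empty : PySem.Dict String Int).getD v 0 = 0 := by
  simp [PySem.Dict.getD, PySem.Dict.get?, PySem.Dict.empty]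

-- ===== VERDICT (by name: the statement is the Claim_ definition above) =====
set_option maxRecDepth 16384 in
theorem negative_score_spec : Claim_equal_negative_score := by
  intro st _
  unfold Spec_negative_score negative_score negative_score_alt
  rw [split_vocab]
  set words := (PySem.Str.split? st " ").getD [] with hwords
  -- A side: the membership loop is a countP
  rw [PySem.List.foldl_if_add_one (fun word => negWords.contains (PySem.Str.lower word)) words 0,
      zero_add]
  -- B side: the counter is a fold over the lowered words
  have hfold : words.foldl
      (fun d w => d.insert (PySem.Str.lower w) (d.getD (PySem.Str.lower w) 0 + 1))
      (PySem.Dict.empty : PySem.Dict String Int)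
      = (words.map PySem.Str.lower).foldl
          (fun d x => d.insert x (d.getD x 0 + 1)) PySem.Dict.empty := by
    rw [List.foldl_map]
  simp only [hfold]
  have hmap : (PySem.Set.ofList negVocabList).map (fun w =>
        ((words.map PySem.Str.lower).foldl
          (fun d x => d.insert x (d.getD x 0 + 1))
          (PySem.Dict.empty : PySem.Dict String Int)).getD w 0)
      = (PySem.Set.ofList negVocabList).map (fun w => ((words.map PySem.Str.lower).count w : Int)) := by
    apply List.map_congr_left
    intro w _
    rw [PySem.Dict.getD_foldl_insert_add_one, getD_empty_int, zero_add]
  rw [hmap, sum_counts _ (PySem.Set.nodup_ofList negVocabList) _]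
  have hp : (words.map PySem.Str.lower).countP
        (fun w => (PySem.Set.ofList negVocabList).contains w)
      = words.countP (fun word => negWords.contains (PySem.Str.lower word)) := by
    rw [List.countP_map]
    apply List.countP_congr
    intro w _
    simp only [Function.comp]
    rw [contains_ofList_str, contains_vocab]
  exact_mod_cast hp.symm
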